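-- pv_equiv track=rewrite | github.com/xinyufei/Quantum-Control-qutip | tools/auxiliary_energy.py | flip_index
-- ===== SOURCE A (Python) =====
-- def flip_index (i, j, n):
--         '''If i is the decimal version of a bit string of length n, this outputs
--         the decimal version of the bit string that is that one but with
--         bit j flipped'''
--
--         rem = i
--         one = +1
--         for k in range(j+1):
--                 temp = rem - 2**(n-k-1)
--                 if (temp>=0):
--                         rem =temp
--                         one = -1
--                 else:
--                         one = +1
--         return i + one*2**(n-j-1)
-- ===== SOURCE B (Python) =====
-- def flip_index(i, j, n):
--     '''If i is the decimal version of a bit string of length n, this outputs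
--     the decimal version of the bit string that is that one but with
--     bit j flipped'''
--     return i ^ (2 ** (n - j - 1))
-- ===== Notes on version B (the rewrite author's own statement) =====
-- stated objective: simpler
-- what changed: A extracts bits of i one by one with a greedy subtraction loop over k = 0..j just to learn the sign of the correction; B flips bit j directly with a single XOR against the mask 2**(n-j-1).
-- outside the precondition, e.g. on flip_index(2, 0, 1): A returns 1, B returns 3; on flip_index(-1, 0, 2): A returns 1, B returns -3
import Mathlib
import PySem

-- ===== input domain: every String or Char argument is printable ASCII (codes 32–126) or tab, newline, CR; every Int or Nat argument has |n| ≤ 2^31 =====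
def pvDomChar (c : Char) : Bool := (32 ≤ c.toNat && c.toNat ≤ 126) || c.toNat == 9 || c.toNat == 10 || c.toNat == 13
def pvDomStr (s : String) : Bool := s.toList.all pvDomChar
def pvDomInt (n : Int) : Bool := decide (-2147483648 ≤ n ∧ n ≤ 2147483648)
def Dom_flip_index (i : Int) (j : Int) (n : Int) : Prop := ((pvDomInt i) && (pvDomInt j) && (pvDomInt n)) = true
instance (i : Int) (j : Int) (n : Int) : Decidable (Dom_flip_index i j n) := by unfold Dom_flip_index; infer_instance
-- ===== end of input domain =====

-- B replaces A's greedy bit-extraction loop (k = 0..j) by a single XOR with the bit mask 2^(n-j-1).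

-- ===== PORT A =====
-- '2**(n-k-1)' is ported as '(2 : Int) ^ (n-k-1).toNat': exact whenever n-k-1 ≥ 0,
-- which Pre_ guarantees for every k in range(j+1) (in Python a negative exponent
-- yields a float and the function no longer returns an int).
def flip_index (i : Int) (j : Int) (n : Int) : Int :=
  let st := (PySem.List.pyRange 0 (j + 1) 1).foldl
    (fun (st : Int × Int) (k : Int) =>
      let temp := st.1 - 2 ^ (n - k - 1).toNat
      if temp ≥ 0 then (temp, -1) else (st.1, 1))
    (i, 1)
  i + st.2 * 2 ^ (n - j - 1).toNat

-- ===== PORT B =====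
-- Source B: 'return i ^ (2 ** (n - j - 1))'; same exponent caveat as in port A.
def flip_index_alt (i : Int) (j : Int) (n : Int) : Int :=
  Int.xor i (2 ^ (n - j - 1).toNat)

-- ===== PRECONDITION & SPEC =====
-- Pre_ is the function's stated domain ('i is the decimal version of a bit string of
-- length n, bit j'), extended to the degenerate j < 0 (empty loop) as long as bit n-j-1
-- of i is zero.  Excluded although A still returns there: negative i, and i too large for
-- the bitstring (i ≥ 2^n for a real bit position) — there i encodes no length-n bitstring
-- and A's value is an accident of the leftover greedy-loop state; for j ≥ n Python's A
-- returns a float, not an int.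
def Pre_flip_index (i : Int) (j : Int) (n : Int) : Prop :=
  0 ≤ i ∧ j < n ∧
    ((0 ≤ j ∧ i < 2 ^ n.toNat) ∨ (j < 0 ∧ i < 2 ^ (n - j - 1).toNat))
instance (i : Int) (j : Int) (n : Int) : Decidable (Pre_flip_index i j n) := by
  unfold Pre_flip_index; infer_instance

def pvWitness_flip_index : Int × Int × Int := (5, 1, 3)

def Spec_flip_index (i : Int) (j : Int) (n : Int) (out : Int) : Prop := out = flip_index_alt i j n
instance (i : Int) (j : Int) (n : Int) (out : Int) : Decidable (Spec_flip_index i j n out) := by unfold Spec_flip_index; infer_instance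

-- ===== CLAIM (what is proved, stated in full; the proofs are below) =====
def Claim_equal_flip_index : Prop := ∀ (i : Int) (j : Int) (n : Int), Dom_flip_index i j n → Pre_flip_index i j n → Spec_flip_index i j n (flip_index i j n)

-- ===== LEMMAS AND PROOFS =====

-- XOR with a single power of two, characterised arithmetically.
lemma xor_two_pow (b I : ℕ) :
    I ^^^ 2 ^ b = if I / 2 ^ b % 2 = 1 then I - 2 ^ b else I + 2 ^ b := by
  induction b generalizing I with
  | zero =>
      have h1 : (I ^^^ 1) / 2 = I / 2 := by rw [Nat.xor_div_two]; simp
      have h2 : (I ^^^ 1) % 2 = 1 ↔ ¬ (I % 2 = 1) := by rw [Nat.xor_mod_two_eq_one]; simp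
      simp only [pow_zero, Nat.div_one]
      generalize I ^^^ 1 = x at h1 h2
      split_ifs with hb <;> omega
  | succ b ih =>
      have h1 : (I ^^^ 2 ^ (b + 1)) / 2 = I / 2 ^^^ 2 ^ b := by
        rw [Nat.xor_div_two]
        congr 1
        rw [pow_succ, Nat.mul_div_cancel _ (by norm_num)]
      rw [ih (I / 2)] at h1
      have h2 : (I ^^^ 2 ^ (b + 1)) % 2 = I % 2 := by
        have h := @Nat.xor_mod_two_eq_one I (2 ^ (b + 1))
        have hp : 2 ^ (b + 1) % 2 = 0 := by
          rw [pow_succ]; exact Nat.mul_mod_left _ _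
        generalize I ^^^ 2 ^ (b + 1) = x at h
        omega
      have h3 : I / 2 ^ (b + 1) = I / 2 / 2 ^ b := by
        rw [Nat.div_div_eq_div_mul, pow_succ']
      have hpow : 2 ^ (b + 1) = 2 * 2 ^ b := by rw [pow_succ]; ring
      have hmul : I / 2 / 2 ^ b * 2 ^ b ≤ I / 2 := Nat.div_mul_le_self _ _
      rw [h3]
      split_ifs at h1 ⊢ with hb
      · have h6 : 2 ^ b ≤ I / 2 := by
          calc 2 ^ b = 1 * 2 ^ b := (one_mul _).symm
            _ ≤ I / 2 / 2 ^ b * 2 ^ b := by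
                refine Nat.mul_le_mul_right _ ?_
                generalize I / 2 / 2 ^ b = q at hb ⊢
                omega
            _ ≤ I / 2 := hmul
        generalize I ^^^ 2 ^ (b + 1) = x at h1 h2 ⊢
        generalize hP : (2:ℕ) ^ (b + 1) = P at hpow ⊢
        generalize (2:ℕ) ^ b = p at h1 h6 hpow
        omega
      · generalize I ^^^ 2 ^ (b + 1) = x at h1 h2 ⊢
        generalize hP : (2:ℕ) ^ (b + 1) = P at hpow ⊢
        generalize (2:ℕ) ^ b = p at h1 hpow
        omega

-- The loop invariant: after processing k = 0 … m, rem holds i mod 2^(n-m-1) and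
-- one records bit n-m-1 of i (as -1 for a set bit, +1 for a clear bit).
lemma flip_loop (N I : ℕ) (hI : I < 2 ^ N) :
    ∀ m : ℕ, m < N →
      (PySem.List.pyRange 0 ((m : Int) + 1) 1).foldl
        (fun (st : Int × Int) (k : Int) =>
          let temp := st.1 - 2 ^ ((N : Int) - k - 1).toNat
          if temp ≥ 0 then (temp, -1) else (st.1, 1))
        ((I : Int), 1)
      = (((I % 2 ^ (N - m - 1) : ℕ) : Int),
         if I / 2 ^ (N - m - 1) % 2 = 1 then -1 else 1) := by
  intro m
  induction m with
  | zero =>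
      intro hm
      rw [show (((0 : ℕ) : Int) + 1) = 0 + 1 by norm_num, PySem.List.pyRange_one_singleton]
      dsimp only [List.foldl]
      have he : (((N : ℕ) : Int) - 0 - 1).toNat = N - 1 := by omega
      rw [he]
      simp only [Nat.sub_zero]
      have hpow : 2 ^ N = 2 * 2 ^ (N - 1) := by rw [← pow_succ']; congr 1; omega
      have hq : I / 2 ^ (N - 1) < 2 := by
        rw [Nat.div_lt_iff_lt_mul (Nat.two_pow_pos _)]; omega
      have hdm := Nat.mod_add_div I (2 ^ (N - 1))
      have hlt : I % 2 ^ (N - 1) < 2 ^ (N - 1) := Nat.mod_lt _ (Nat.two_pow_pos _)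
      have hc : ((2 : Int) ^ (N - 1)) = ((2 ^ (N - 1) : ℕ) : Int) := by push_cast; ring
      rw [hc]
      have hq01 : I / 2 ^ (N - 1) = 0 ∨ I / 2 ^ (N - 1) = 1 := by
        generalize I / 2 ^ (N - 1) = q at hq ⊢; omega
      rcases hq01 with h0 | h0
      · rw [if_neg (show ¬ (I / 2 ^ (N - 1) % 2 = 1) by rw [h0]; simp)]
        rw [h0] at hdm
        generalize I % 2 ^ (N - 1) = r at hdm hlt ⊢
        generalize (2 : ℕ) ^ (N - 1) = p at hdm hpow hlt ⊢
        split_ifs with h1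
        · exfalso; omega
        · simp only [Prod.mk.injEq]; exact ⟨by omega, trivial⟩
      · rw [if_pos (show I / 2 ^ (N - 1) % 2 = 1 by rw [h0])]
        rw [h0] at hdm
        generalize I % 2 ^ (N - 1) = r at hdm hlt ⊢
        generalize (2 : ℕ) ^ (N - 1) = p at hdm hpow hlt ⊢
        split_ifs with h1
        · simp only [Prod.mk.injEq]; exact ⟨by omega, trivial⟩
        · exfalso; omega
  | succ m ih =>
      intro hm
      have hm' : m < N := by omega
      have hcast : (((m + 1 : ℕ)) : Int) + 1 = ((m : ℕ) : Int) + 1 + 1 := by push_cast; ring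
      rw [hcast, PySem.List.pyRange_one_succ_right (by positivity), List.foldl_append,
        ih hm']
      dsimp only [List.foldl]
      have he : (((N : ℕ) : Int) - (((m : ℕ) : Int) + 1) - 1).toNat = N - m - 2 := by omega
      rw [he]
      have h5 : N - (m + 1) - 1 = N - m - 2 := by omega
      rw [h5]
      have hpow : 2 ^ (N - m - 1) = 2 * 2 ^ (N - m - 2) := by rw [← pow_succ']; congr 1; omega
      have hbit : I % 2 ^ (N - m - 1) / 2 ^ (N - m - 2) = I / 2 ^ (N - m - 2) % 2 := by
        rw [hpow]; exact Nat.mod_mul_left_div_self _ _ _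
      have hmodmod : I % 2 ^ (N - m - 1) % 2 ^ (N - m - 2) = I % 2 ^ (N - m - 2) :=
        Nat.mod_mod_of_dvd _ ⟨2, by rw [hpow]; ring⟩
      have hdm : I % 2 ^ (N - m - 1) % 2 ^ (N - m - 2)
          + 2 ^ (N - m - 2) * (I % 2 ^ (N - m - 1) / 2 ^ (N - m - 2))
          = I % 2 ^ (N - m - 1) := Nat.mod_add_div _ _
      rw [hmodmod, hbit] at hdm
      have hr : I % 2 ^ (N - m - 1) < 2 ^ (N - m - 1) := Nat.mod_lt _ (Nat.two_pow_pos _)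
      rw [hpow] at hr
      have hlt2 : I % 2 ^ (N - m - 2) < 2 ^ (N - m - 2) := Nat.mod_lt _ (Nat.two_pow_pos _)
      have hc : ((2 : Int) ^ (N - m - 2)) = ((2 ^ (N - m - 2) : ℕ) : Int) := by push_cast; ring
      rw [hc]
      have hq01 : I / 2 ^ (N - m - 2) % 2 = 0 ∨ I / 2 ^ (N - m - 2) % 2 = 1 := by
        have h2 : I / 2 ^ (N - m - 2) % 2 < 2 := Nat.mod_lt _ (by norm_num)
        generalize I / 2 ^ (N - m - 2) % 2 = q at h2 ⊢; omega
      rcases hq01 with h0 | h0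
      · rw [if_neg (show ¬ (I / 2 ^ (N - m - 2) % 2 = 1) by rw [h0]; simp)]
        rw [h0] at hdm
        generalize I % 2 ^ (N - m - 1) = r1 at hdm hr ⊢
        generalize I % 2 ^ (N - m - 2) = r2 at hdm hlt2 ⊢
        generalize (2 : ℕ) ^ (N - m - 2) = p at hdm hr hlt2 ⊢
        split_ifs with h1
        · exfalso; omega
        · simp only [Prod.mk.injEq]; exact ⟨by omega, trivial⟩
      · rw [if_pos h0]
        rw [h0] at hdm
        generalize I % 2 ^ (N - m - 1) = r1 at hdm hr ⊢
        generalize I % 2 ^ (N - m - 2) = r2 at hdm hlt2 ⊢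
        generalize (2 : ℕ) ^ (N - m - 2) = p at hdm hr hlt2 ⊢
        split_ifs with h1
        · simp only [Prod.mk.injEq]; exact ⟨by omega, trivial⟩
        · exfalso; omega

-- ===== VERDICT (by name: the statement is the Claim_ definition above) =====
theorem flip_index_spec : Claim_equal_flip_index := by
  intro i j n _ hpre
  obtain ⟨hi0, hjn, hpre⟩ := hpre
  rcases hpre with ⟨hj0, hiu⟩ | ⟨hjneg, hiu⟩
  case inr =>
    have hnil : PySem.List.pyRange 0 (j + 1) 1 = [] :=
      PySem.List.pyRange_one_eq_nil (by omega)
    show flip_index i j n = flip_index_alt i j n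
    rw [flip_index, flip_index_alt, hnil]
    dsimp only [List.foldl]
    have hi : i = ((i.toNat : ℕ) : Int) := (Int.toNat_of_nonneg hi0).symm
    have hIu : i.toNat < 2 ^ (n - j - 1).toNat := by
      have h : ((i.toNat : ℕ) : Int) < ((2 ^ (n - j - 1).toNat : ℕ) : Int) := by
        rw [← hi]; push_cast; exact hiu
      exact_mod_cast h
    have hc : ((2 : Int) ^ (n - j - 1).toNat)
        = ((2 ^ (n - j - 1).toNat : ℕ) : Int) := by push_cast; ring
    rw [hi, hc]
    have hxor : Int.xor ((i.toNat : ℕ) : Int) ((2 ^ (n - j - 1).toNat : ℕ) : Int)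
        = ((i.toNat ^^^ 2 ^ (n - j - 1).toNat : ℕ) : Int) := rfl
    rw [hxor, xor_two_pow]
    rw [if_neg (by rw [Nat.div_eq_of_lt hIu]; simp)]
    push_cast
    ring
  case inl =>
  have hn0 : 0 ≤ n := le_trans hj0 (le_of_lt hjn)
  have hi : i = ((i.toNat : ℕ) : Int) := (Int.toNat_of_nonneg hi0).symm
  have hj : j = ((j.toNat : ℕ) : Int) := (Int.toNat_of_nonneg hj0).symm
  have hn : n = ((n.toNat : ℕ) : Int) := (Int.toNat_of_nonneg hn0).symm
  have hJN : j.toNat < n.toNat := by omega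
  have hIu : i.toNat < 2 ^ n.toNat := by
    have h : ((i.toNat : ℕ) : Int) < ((2 ^ n.toNat : ℕ) : Int) := by
      rw [← hi]; push_cast; exact hiu
    exact_mod_cast h
  show flip_index i j n = flip_index_alt i j n
  rw [flip_index, flip_index_alt, hi, hj, hn]
  rw [flip_loop n.toNat i.toNat hIu j.toNat hJN]
  have he : (((n.toNat : ℕ) : Int) - ((j.toNat : ℕ) : Int) - 1).toNat
      = n.toNat - j.toNat - 1 := by omega
  rw [he]
  have hc : ((2 : Int) ^ (n.toNat - j.toNat - 1))
      = ((2 ^ (n.toNat - j.toNat - 1) : ℕ) : Int) := by push_cast; ring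
  have hxor : Int.xor ((i.toNat : ℕ) : Int) ((2 ^ (n.toNat - j.toNat - 1) : ℕ) : Int)
      = ((i.toNat ^^^ 2 ^ (n.toNat - j.toNat - 1) : ℕ) : Int) := rfl
  rw [hc, hxor, xor_two_pow]
  have hle : i.toNat / 2 ^ (n.toNat - j.toNat - 1) % 2 = 1
      → 2 ^ (n.toNat - j.toNat - 1) ≤ i.toNat := by
    intro hb
    calc 2 ^ (n.toNat - j.toNat - 1) = 1 * 2 ^ (n.toNat - j.toNat - 1) := (one_mul _).symm
      _ ≤ i.toNat / 2 ^ (n.toNat - j.toNat - 1) * 2 ^ (n.toNat - j.toNat - 1) := by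
          refine Nat.mul_le_mul_right _ ?_
          generalize i.toNat / 2 ^ (n.toNat - j.toNat - 1) = q at hb ⊢
          omega
      _ ≤ i.toNat := Nat.div_mul_le_self _ _
  split_ifs with hb
  · have h := hle hb
    push_cast [Nat.cast_sub h]
    ring
  · push_cast
    ring
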